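-- pv_equiv track=rewrite | github.com/bruesebt/Network_Security | aes_m12226365/src/initializeData.py | initializeData
-- ===== SOURCE A (Python) =====
-- def initializeData(message):
--     ascii_values = []
--     for c in message:
--         ascii_values.append("{0:02x}".format(ord(c), "x"))
--     #instead of just the list, now we make it into a matrix
--     col_1 = ascii_values[:4] #first 4 elements
--     col_2 = ascii_values[4:8] #second 4 elements
--     col_3 = ascii_values[8:12] #third 4 elements
--     col_4 = ascii_values[12:] #last 4 elements
--     matrix = [col_1, col_2, col_3, col_4]
--     return matrix
-- ===== SOURCE B (Python) =====
-- def initializeData(message):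
--     matrix = [[], [], [], []]
--     for i, c in enumerate(message):
--         matrix[min(i // 4, 3)].append("{0:02x}".format(ord(c)))
--     return matrix
-- ===== Notes on version B (the rewrite author's own statement) =====
-- stated objective: alternative
-- what changed: B builds the 4-column matrix in a single enumerate pass, dispatching each hex byte directly into its column by index, instead of first materialising the full hex list and slicing it four times.
import Mathlib
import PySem

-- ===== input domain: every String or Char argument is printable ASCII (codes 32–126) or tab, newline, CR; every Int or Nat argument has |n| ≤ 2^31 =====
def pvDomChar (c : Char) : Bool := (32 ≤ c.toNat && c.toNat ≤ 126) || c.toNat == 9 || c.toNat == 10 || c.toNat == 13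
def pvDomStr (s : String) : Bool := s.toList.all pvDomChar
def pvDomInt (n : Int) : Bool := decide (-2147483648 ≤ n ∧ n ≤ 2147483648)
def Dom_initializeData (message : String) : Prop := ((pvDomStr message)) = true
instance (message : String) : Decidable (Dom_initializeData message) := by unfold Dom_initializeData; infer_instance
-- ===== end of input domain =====

-- B builds the matrix in one enumerate pass, dispatching each hex byte into its column, instead of slicing a pre-built list (alternative decomposition, same cost).

-- ===== PORT A =====
-- "{0:02x}".format(ord(c)) : exact for char codes < 256 (two lowercase hex digits); Dom gives codes ≤ 126
def hexDigit (n : Nat) : Char := if n < 10 then Char.ofNat (48 + n) else Char.ofNat (87 + n)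
def hex2 (c : Char) : String := String.mk [hexDigit (c.toNat / 16), hexDigit (c.toNat % 16)]

def initializeData (message : String) : List (List String) :=
  let ascii_values := message.toList.foldl (fun acc c => acc ++ [hex2 c]) []
  let col_1 := PySem.List.slice ascii_values none (some 4)
  let col_2 := PySem.List.slice ascii_values (some 4) (some 8)
  let col_3 := PySem.List.slice ascii_values (some 8) (some 12)
  let col_4 := PySem.List.slice ascii_values (some 12) none
  [col_1, col_2, col_3, col_4]

-- ===== PORT B =====
-- matrix[min(i // 4, 3)].append(hex2 c); the index is always in 0..3, so .toNat is exact
def bStep (m : List (List String)) (p : Int × Char) : List (List String) :=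
  m.modify (min (PySem.Int.floordiv p.1 4) 3).toNat (fun col => col ++ [hex2 p.2])

def initializeData_alt (message : String) : List (List String) :=
  (PySem.List.enumerate message.toList 0).foldl bStep [[], [], [], []]

-- ===== PRECONDITION & SPEC =====
def Spec_initializeData (message : String) (out : List (List String)) : Prop := out = initializeData_alt message
instance (message : String) (out : List (List String)) : Decidable (Spec_initializeData message out) := by unfold Spec_initializeData; infer_instance

-- ===== CLAIM (what is proved, stated in full; the proofs are below) =====
def Claim_equal_initializeData : Prop := ∀ (message : String), Dom_initializeData message → Spec_initializeData message (initializeData message)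

-- ===== LEMMAS AND PROOFS =====

lemma foldl_append_hex (xs : List Char) (l : List String) :
    xs.foldl (fun acc c => acc ++ [hex2 c]) l = l ++ xs.map hex2 := by
  induction xs generalizing l with
  | nil => simp
  | cons x xs ih => simp [List.foldl_cons, ih, List.append_assoc]

lemma bfold (xs : List Char) (s : Nat) (a b c d : List String) :
    (PySem.List.enumerate xs (s : Int)).foldl bStep [a, b, c, d] =
      [a ++ (xs.take (4 - s)).map hex2,
       b ++ ((xs.drop (4 - s)).take ((8 - s) - (4 - s))).map hex2,
       c ++ ((xs.drop (8 - s)).take ((12 - s) - (8 - s))).map hex2,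
       d ++ (xs.drop (12 - s)).map hex2] := by
  induction xs generalizing s a b c d with
  | nil => simp [PySem.List.enumerate_nil]
  | cons x xs ih =>
    rw [PySem.List.enumerate_cons, List.foldl_cons]
    have hcast : (s : Int) + 1 = ((s + 1 : Nat) : Int) := by push_cast; ring
    have hstep : bStep [a, b, c, d] ((s : Int), x)
        = List.modify [a, b, c, d] (min (s / 4) 3) (fun col => col ++ [hex2 x]) := by
      simp [bStep]
      congr 1
      omega
    rw [hstep, hcast]
    by_cases h0 : s < 4
    · have hm : min (s / 4) 3 = 0 := by omega
      rw [hm]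
      show (PySem.List.enumerate xs ((s+1 : Nat) : Int)).foldl bStep [a ++ [hex2 x], b, c, d] = _
      rw [ih (s + 1)]
      interval_cases s <;> simp [List.modify]
    · by_cases h1 : s < 8
      · have hm : min (s / 4) 3 = 1 := by omega
        rw [hm]
        show (PySem.List.enumerate xs ((s+1 : Nat) : Int)).foldl bStep [a, b ++ [hex2 x], c, d] = _
        rw [ih (s + 1)]
        interval_cases s <;> simp [List.modify]
      · by_cases h2 : s < 12
        · have hm : min (s / 4) 3 = 2 := by omega
          rw [hm]
          show (PySem.List.enumerate xs ((s+1 : Nat) : Int)).foldl bStep [a, b, c ++ [hex2 x], d] = _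
          rw [ih (s + 1)]
          interval_cases s <;> simp [List.modify]
        · have hm : min (s / 4) 3 = 3 := by omega
          have e4 : 4 - s = 0 := by omega
          have e8 : 8 - s = 0 := by omega
          have e12 : 12 - s = 0 := by omega
          have e4' : 4 - (s + 1) = 0 := by omega
          have e8' : 8 - (s + 1) = 0 := by omega
          have e12' : 12 - (s + 1) = 0 := by omega
          rw [hm]
          show (PySem.List.enumerate xs ((s+1 : Nat) : Int)).foldl bStep [a, b, c, d ++ [hex2 x]] = _
          rw [ih (s + 1)]
          simp [List.modify, e4, e8, e12, e4', e8', e12']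

-- ===== VERDICT (by name: the statement is the Claim_ definition above) =====
theorem initializeData_spec : Claim_equal_initializeData := by
  intro message _
  unfold Spec_initializeData initializeData initializeData_alt
  have h0 : (0 : Int) = ((0 : Nat) : Int) := rfl
  rw [h0, bfold message.toList 0 [] [] [] []]
  rw [foldl_append_hex]
  simp [pysem, List.map_take, List.map_drop]
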